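-- pv_equiv track=rewrite | github.com/liuzhonghe060718/Introduction-to-computation-B | 深搜广搜/数字操作.py | bfs
-- ===== SOURCE A (Python) =====
-- from collections import deque
--
-- def bfs(n):
--     stocks=deque([(1,0)])
--     used=[False]*(n+1)
--     while stocks:
--         num,steps=stocks.popleft()
--         if num<=n and not used[num]:
--             if num==n:
--                 return steps
--             steps+=1
--             stocks.append((num*2,steps))
--             stocks.append((num+1,steps))
--             used[num]=True
-- ===== SOURCE B (Python) =====
-- def bfs(n):
--     # Greedy backward from n: halve when even, else subtract 1 (O(log n)).
--     steps = 0
--     while n > 1: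
--         if n % 2 == 0:
--             n //= 2
--         else:
--             n -= 1
--         steps += 1
--     return steps
-- ===== Notes on version B (the rewrite author's own statement) =====
-- stated objective: faster
-- what changed: Replaces the forward breadth-first search over a queue and a visited array by a backward greedy loop (halve n when even, else subtract 1), which computes the same minimal operation count in O(log n).
-- outside the precondition, e.g. on bfs(0): A returns None, B returns 0; on bfs(-3): A returns None, B returns 0
import Mathlib
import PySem

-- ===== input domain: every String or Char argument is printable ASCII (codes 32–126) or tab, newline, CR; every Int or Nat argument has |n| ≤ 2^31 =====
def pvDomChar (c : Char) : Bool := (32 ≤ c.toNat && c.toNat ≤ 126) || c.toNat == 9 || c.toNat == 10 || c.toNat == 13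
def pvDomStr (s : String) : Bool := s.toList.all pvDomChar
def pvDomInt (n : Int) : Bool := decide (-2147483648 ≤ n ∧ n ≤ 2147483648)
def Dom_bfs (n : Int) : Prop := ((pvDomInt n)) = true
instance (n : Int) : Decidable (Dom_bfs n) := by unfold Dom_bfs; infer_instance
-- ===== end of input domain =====

-- B replaces A's forward breadth-first search (queue + visited array) by a backward greedy
-- loop (halve when even, else subtract one): same minimal operation count, O(log n) instead of O(n).

-- ===== PORT A =====
-- Helpers for the port: `collections.deque` is ported as the standard two-list functional
-- queue (`front` ++ `back.reverse` is the deque's content; popleft rotates `back` into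
-- `front` when `front` is empty), and the list `used` as an Array for O(1) access.
-- `pvALook U m` / `pvASet U m b` are `U[m]` / `U[m] = b`: exact for 0 ≤ m < size, which
-- holds at every reachable access (1 ≤ num ≤ n < size); Python would raise otherwise.
def pvALook (U : Array Bool) (m : Int) : Bool := (U[m.toNat]?).getD true

def pvASet (U : Array Bool) (m : Int) (b : Bool) : Array Bool := U.setIfInBounds m.toNat b

def pvCountFalse (U : Array Bool) : Nat := U.toList.count false

-- marking an unvisited cell shrinks the number of `false` entries (used for termination)
theorem pvCountFalseSet (U : List Bool) (j : Nat) (h : U[j]? = some false) :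
    (U.set j true).count false + 1 = U.count false := by
  induction U generalizing j with
  | nil => simp at h
  | cons a t ih =>
    cases j with
    | zero =>
      simp only [List.getElem?_cons_zero, Option.some.injEq] at h
      subst h; simp
    | succ j =>
      simp only [List.getElem?_cons_succ] at h
      simp only [List.set, List.count_cons]
      have := ih j h
      by_cases ha : a = false <;> simp [ha] <;> omega

theorem pvCountASet (U : Array Bool) (m : Int) (h : pvALook U m = false) :
    pvCountFalse (pvASet U m true) + 1 = pvCountFalse U := by
  have hj : U.toList[m.toNat]? = some false := by
    unfold pvALook at h
    cases hx : U[m.toNat]? with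
    | none => rw [hx] at h; simp at h
    | some b =>
      rw [hx] at h; simp at h; subst h
      rw [Array.getElem?_toList]; exact hx
  unfold pvCountFalse pvASet
  rw [Array.toList_setIfInBounds]
  exact pvCountFalseSet U.toList m.toNat hj

-- literal transliteration of A's while-loop over the deque `stocks` (= front ++ back.reverse)
-- and the visited list `used`; `none` = Python falling off the loop and returning None
def bfsLoop (n : Int) (front back : List (Int × Int)) (used : Array Bool) : Option Int :=
  match front with
  | [] =>
    match back with
    | [] => none
    | b :: bs => bfsLoop n ((b :: bs).reverse) [] used   -- deque rotation (popleft reaches the back)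
  | (num, steps) :: rest =>
    if hg : num ≤ n ∧ pvALook used num = false then
      if num = n then some steps
      else bfsLoop n rest ((num + 1, steps + 1) :: (num * 2, steps + 1) :: back)
             (pvASet used num true)
    else bfsLoop n rest back used
termination_by 5 * pvCountFalse used + front.length + 2 * back.length
decreasing_by
  all_goals simp only [List.length_reverse, List.length_cons, List.length_nil]
  all_goals first
    | (have := pvCountASet used num hg.2; omega)
    | omega

def bfs (n : Int) : Int :=
  -- Python returns None only when the queue empties (n ≤ 0, excluded by Pre_bfs);
  -- `.getD 0` covers only that dead branch
  (bfsLoop n [(1, 0)] [] (Array.replicate (n + 1).toNat false)).getD 0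

-- ===== PORT B =====
def bfsAltGo (n : Int) (steps : Int) : Int :=
  if h : 1 < n then
    if PySem.Int.mod n 2 = 0 then bfsAltGo (PySem.Int.floordiv n 2) (steps + 1)
    else bfsAltGo (n - 1) (steps + 1)
  else steps
termination_by n.toNat
decreasing_by
  · rw [PySem.Int.floordiv_eq_ediv_of_pos (by omega)]; omega
  · omega

def bfs_alt (n : Int) : Int := bfsAltGo n 0

-- ===== PRECONDITION & SPEC =====
-- Pre_bfs excludes n ≤ 0, where A's queue empties and the Python function returns None
-- (not an int); B returns 0 there.
def Pre_bfs (n : Int) : Prop := 1 ≤ n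
instance (n : Int) : Decidable (Pre_bfs n) := by unfold Pre_bfs; infer_instance

def pvWitness_bfs : Int := 5

def Spec_bfs (n : Int) (out : Int) : Prop := out = bfs_alt n
instance (n : Int) (out : Int) : Decidable (Spec_bfs n out) := by unfold Spec_bfs; infer_instance

-- ===== CLAIM (what is proved, stated in full; the proofs are below) =====
def Claim_equal_bfs : Prop := ∀ (n : Int), Dom_bfs n → Pre_bfs n → Spec_bfs n (bfs n)

-- ===== LEMMAS AND PROOFS =====

-- the greedy step count: gI n = minimal number of ×2/+1 moves from 1 to n (for n ≥ 1)
def gI (n : Int) : Int :=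
  if n ≤ 1 then 0
  else if n % 2 = 0 then gI (n / 2) + 1 else gI (n - 1) + 1
termination_by n.toNat
decreasing_by
  · omega
  · omega

theorem gI_le_one (n : Int) (h : n ≤ 1) : gI n = 0 := by
  rw [gI]; simp [h]

theorem gI_even (n : Int) (h2 : 2 ≤ n) (he : n % 2 = 0) : gI n = gI (n / 2) + 1 := by
  rw [gI]; rw [if_neg (by omega), if_pos he]

theorem gI_odd (n : Int) (h2 : 2 ≤ n) (ho : ¬ n % 2 = 0) : gI n = gI (n - 1) + 1 := by
  rw [gI]; rw [if_neg (by omega), if_neg ho]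

theorem gI_nonneg (n : Int) : 0 ≤ gI n := by
  induction n using gI.induct with
  | case1 n h => rw [gI_le_one n h]
  | case2 n h he ih => rw [gI_even n (by omega) he]; omega
  | case3 n h ho ih => rw [gI_odd n (by omega) ho]; omega

theorem gI_pos (n : Int) (h2 : 2 ≤ n) : 1 ≤ gI n := by
  by_cases he : n % 2 = 0
  · rw [gI_even n h2 he]; have := gI_nonneg (n / 2); omega
  · rw [gI_odd n h2 he]; have := gI_nonneg (n - 1); omega

theorem gI_two_mul (m : Int) (h : 1 ≤ m) : gI (m * 2) = gI m + 1 := by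
  have he : (m * 2) % 2 = 0 := by omega
  rw [gI_even (m * 2) (by omega) he]
  have : m * 2 / 2 = m := by omega
  rw [this]

-- the greedy parent of m (m ≥ 2): the node the backward step moves to
def pvParent (m : Int) : Int := if m % 2 = 0 then m / 2 else m - 1

theorem pvParent_spec (m : Int) (h2 : 2 ≤ m) :
    1 ≤ pvParent m ∧ pvParent m < m ∧ gI m = gI (pvParent m) + 1 := by
  unfold pvParent
  by_cases he : m % 2 = 0
  · rw [if_pos he]
    exact ⟨by omega, by omega, gI_even m h2 he⟩
  · rw [if_neg he]
    exact ⟨by omega, by omega, gI_odd m h2 he⟩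

theorem gI_succ_le : ∀ (k : Nat) (m : Int), m.toNat ≤ k → 1 ≤ m → gI (m + 1) ≤ gI m + 1 := by
  intro k
  induction k with
  | zero => intro m hk h1; omega
  | succ k ih =>
    intro m hk h1
    by_cases hm1 : m = 1
    · subst hm1
      have e1 : (1 : Int) + 1 = 2 := by norm_num
      rw [e1, gI_even 2 (by omega) (by omega)]
      have e2 : (2 : Int) / 2 = 1 := by norm_num
      rw [e2, gI_le_one 1 (by omega)]
    · have hm2 : 2 ≤ m := by omega
      by_cases he : (m + 1) % 2 = 0
      · -- m odd, m ≥ 3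
        have hm3 : 3 ≤ m := by omega
        have hk' : gI (m + 1) = gI ((m + 1) / 2) + 1 := gI_even (m + 1) (by omega) he
        have hgm : gI m = gI (m - 1) + 1 := gI_odd m hm2 (by omega)
        have hgm1 : gI (m - 1) = gI ((m - 1) / 2) + 1 := gI_even (m - 1) (by omega) (by omega)
        have heq1 : (m - 1) / 2 = (m + 1) / 2 - 1 := by omega
        have hih : gI ((m + 1) / 2 - 1 + 1) ≤ gI ((m + 1) / 2 - 1) + 1 := by
          apply ih
          · omega
          · omega
        have heq2 : (m + 1) / 2 - 1 + 1 = (m + 1) / 2 := by omega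
        rw [heq2] at hih
        rw [hk', hgm, hgm1, heq1]
        omega
      · have : gI (m + 1) = gI (m + 1 - 1) + 1 := gI_odd (m + 1) (by omega) he
        have heq : m + 1 - 1 = m := by omega
        rw [heq] at this
        omega

-- B's loop computes steps + gI n
theorem bfsAltGo_eq (n steps : Int) : bfsAltGo n steps = steps + gI n := by
  induction n, steps using bfsAltGo.induct with
  | case1 n steps h he ih =>
    rw [bfsAltGo]
    rw [dif_pos h, if_pos he, ih]
    rw [PySem.Int.mod_eq_emod_of_pos (by omega)] at he
    rw [PySem.Int.floordiv_eq_ediv_of_pos (by omega)]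
    rw [gI_even n (by omega) he]
    omega
  | case2 n steps h he ih =>
    rw [bfsAltGo]
    rw [dif_pos h, if_neg he, ih]
    rw [PySem.Int.mod_eq_emod_of_pos (by omega)] at he
    rw [gI_odd n (by omega) he]
    omega
  | case3 n steps h =>
    rw [bfsAltGo, dif_neg h, gI_le_one n (by omega)]
    omega

-- `used[m]` as a total function (all uses are in range)
def pvLook (U : List Bool) (m : Int) : Bool := PySem.List.pyGetD U m true

theorem pvLook_set (U : List Bool) (j m : Int) (hj0 : 0 ≤ j) (_hj : j < (U.length : Int))
    (hm0 : 0 ≤ m) (hm : m < (U.length : Int)) :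
    pvLook (PySem.List.pySetD U j true) m = if m = j then true else pvLook U m := by
  unfold pvLook
  rw [PySem.List.pySetD_of_nonneg U true hj0]
  rw [PySem.List.pyGetD_eq_getElem _ _ hm0 (by rw [List.length_set]; exact hm)]
  rw [List.getElem_set]
  by_cases hmj : m = j
  · rw [if_pos hmj, if_pos (by omega)]
  · rw [if_neg hmj, if_neg (by omega)]
    rw [PySem.List.pyGetD_eq_getElem _ _ hm0 hm]

theorem pvLook_replicate (k : Nat) (m : Int) (h0 : 0 ≤ m) (hm : m < (k : Int)) :
    pvLook (List.replicate k false) m = false := by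
  unfold pvLook
  rw [PySem.List.pyGetD_eq_getElem _ _ h0 (by simpa using hm)]
  simp

-- the BFS invariant: U has length n+1; the queue splits into a level-s0 prefix and a
-- level-(s0+1) suffix; every entry (m,s) has 1 ≤ m and gI m ≤ s; visited nodes have
-- gI ≤ s0; every unvisited node of level ≤ s0+1 is in the queue at its level, or is at
-- level s0+1 with its greedy parent still unvisited
def pvInv (n : Int) (Q : List (Int × Int)) (U : List Bool) (s0 : Int) : Prop :=
  0 ≤ s0 ∧ ((U.length : Int) = n + 1) ∧
  (∃ Q1 Q2, Q = Q1 ++ Q2 ∧ (∀ e ∈ Q1, e.2 = s0) ∧ (∀ e ∈ Q2, e.2 = s0 + 1)) ∧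
  (∀ e ∈ Q, 1 ≤ e.1 ∧ gI e.1 ≤ e.2) ∧
  (∀ m : Int, 1 ≤ m → m ≤ n → pvLook U m = true → gI m ≤ s0) ∧
  (∀ m : Int, 1 ≤ m → m ≤ n → pvLook U m = false → gI m ≤ s0 + 1 →
      ((m, gI m) ∈ Q ∨ (gI m = s0 + 1 ∧ pvLook U (pvParent m) = false)))

theorem pvInv_steps (Q : List (Int × Int)) (s0 : Int)
    (hsplit : ∃ Q1 Q2, Q = Q1 ++ Q2 ∧ (∀ e ∈ Q1, e.2 = s0) ∧ (∀ e ∈ Q2, e.2 = s0 + 1)) :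
    ∀ e ∈ Q, e.2 = s0 ∨ e.2 = s0 + 1 := by
  obtain ⟨Q1, Q2, heq, h1, h2⟩ := hsplit
  intro e he
  rw [heq] at he
  rcases List.mem_append.mp he with h | h
  · exact Or.inl (h1 e h)
  · exact Or.inr (h2 e h)

-- level shift: when every queue entry is at level s0+1, the invariant holds at s0+1
theorem pvShift (n : Int) (Q : List (Int × Int)) (U : List Bool) (s0 : Int)
    (hInv : pvInv n Q U s0) (hall : ∀ e ∈ Q, e.2 = s0 + 1) : pvInv n Q U (s0 + 1) := by
  obtain ⟨hs0, hlen, hsplit, h2, h3a, h3b⟩ := hInv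
  refine ⟨by omega, hlen, ⟨Q, [], by simp, hall, by simp⟩, h2, ?_, ?_⟩
  · intro m h1 hmn ht
    have := h3a m h1 hmn ht
    omega
  · intro m h1 hmn hf hle
    by_cases hle' : gI m ≤ s0 + 1
    · rcases h3b m h1 hmn hf hle' with hmem | ⟨hg, hpu⟩
      · exact Or.inl hmem
      · -- the unvisited parent would be a level-s0 entry of the queue: impossible
        have hm2 : 2 ≤ m := by
          by_contra hc
          have := gI_le_one m (by omega)
          omega
        obtain ⟨hp1, hplt, hpg⟩ := pvParent_spec m hm2
        rcases h3b (pvParent m) hp1 (by omega) hpu (by omega) with hpm | ⟨hpg', _⟩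
        · have := hall _ hpm
          simp at this
          omega
        · omega
    · have hgm : gI m = s0 + 2 := by omega
      right
      have hm2 : 2 ≤ m := by
        by_contra hc
        have := gI_le_one m (by omega)
        omega
      obtain ⟨hp1, hplt, hpg⟩ := pvParent_spec m hm2
      refine ⟨by omega, ?_⟩
      by_contra hc
      have hpt : pvLook U (pvParent m) = true := by
        cases hb : pvLook U (pvParent m)
        · exact absurd hb hc
        · rfl
      have := h3a (pvParent m) hp1 (by omega) hpt
      omega

-- normalization: the head's step count can be taken as the invariant's level
theorem pvNorm (n num steps : Int) (rest : List (Int × Int)) (U : List Bool) (s0 : Int)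
    (hInv : pvInv n ((num, steps) :: rest) U s0) :
    ∃ s0', steps = s0' ∧ pvInv n ((num, steps) :: rest) U s0' := by
  obtain ⟨hs0, hlen, hsplit, h2, h3a, h3b⟩ := hInv
  obtain ⟨Q1, Q2, heq, hl1, hl2⟩ := hsplit
  cases Q1 with
  | nil =>
    simp only [List.nil_append] at heq
    have hall : ∀ e ∈ (num, steps) :: rest, e.2 = s0 + 1 := by
      intro e he
      exact hl2 e (by rw [← heq]; exact he)
    refine ⟨s0 + 1, ?_, pvShift n _ U s0 ⟨hs0, hlen, ⟨[], Q2, by simp [heq], by simp, hl2⟩, h2, h3a, h3b⟩ hall⟩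
    have := hall (num, steps) (by simp)
    simpa using this
  | cons a Q1' =>
    have h' : (num, steps) = a ∧ rest = Q1' ++ Q2 := by simpa using heq
    refine ⟨s0, ?_, hs0, hlen, ⟨a :: Q1', Q2, heq, hl1, hl2⟩, h2, h3a, h3b⟩
    have := hl1 a (by simp)
    rw [← h'.1] at this
    simpa using this

-- an unvisited in-range head is popped exactly at its greedy level
theorem pvFrontg (n num : Int) (rest : List (Int × Int)) (U : List Bool) (s0 : Int)
    (hInv : pvInv n ((num, s0) :: rest) U s0) (hle : num ≤ n) (hf : pvLook U num = false) :
    gI num = s0 := by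
  obtain ⟨hs0, hlen, hsplit, h2, h3a, h3b⟩ := hInv
  have h1 : 1 ≤ num := (h2 (num, s0) (by simp)).1
  have hg_le : gI num ≤ s0 := (h2 (num, s0) (by simp)).2
  by_contra hne
  have hlt : gI num < s0 := lt_of_le_of_ne hg_le hne
  rcases h3b num h1 hle hf (by omega) with hmem | ⟨hg, _⟩
  · have := pvInv_steps _ s0 hsplit (num, gI num) hmem
    simp at this
    omega
  · omega

-- empty queue is impossible while n is unvisited
theorem pvNoEmpty (n : Int) (U : List Bool) (s0 : Int) (hn : 1 ≤ n)
    (hInv : pvInv n [] U s0) (hN : pvLook U n = false) : False := by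
  obtain ⟨hs0, hlen, _, _, h3a, h3b⟩ := hInv
  have hex : ∃ k : Nat, 1 ≤ (k : Int) ∧ (k : Int) ≤ n ∧ pvLook U (k : Int) = false := by
    refine ⟨n.toNat, by omega, by omega, ?_⟩
    have : ((n.toNat : Nat) : Int) = n := by omega
    rw [this]; exact hN
  have hk0 := Nat.find_spec hex
  set k0 := Nat.find hex with hk0def
  obtain ⟨h1, h2, h3⟩ := hk0
  by_cases hm1 : (k0 : Int) = 1
  · have hg : gI (k0 : Int) = 0 := gI_le_one _ (by omega)
    rcases h3b (k0 : Int) h1 h2 h3 (by omega) with hmem | ⟨hg', _⟩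
    · simp at hmem
    · omega
  · have hm2 : 2 ≤ (k0 : Int) := by omega
    obtain ⟨hp1, hplt, hpg⟩ := pvParent_spec (k0 : Int) hm2
    by_cases hpu : pvLook U (pvParent (k0 : Int)) = false
    · -- a smaller unvisited node: contradicts minimality of k0
      have hplt' : (pvParent (k0 : Int)).toNat < k0 := by omega
      have := Nat.find_min hex hplt'
      apply this
      refine ⟨by omega, by omega, ?_⟩
      have : (((pvParent (k0 : Int)).toNat : Nat) : Int) = pvParent (k0 : Int) := by omega
      rw [this]; exact hpu
    · have hpt : pvLook U (pvParent (k0 : Int)) = true := by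
        cases hb : pvLook U (pvParent (k0 : Int))
        · exact absurd hb hpu
        · rfl
      have hps : gI (pvParent (k0 : Int)) ≤ s0 := h3a _ hp1 (by omega) hpt
      rcases h3b (k0 : Int) h1 h2 h3 (by omega) with hmem | ⟨_, hpu'⟩
      · simp at hmem
      · rw [hpu'] at hpt
        simp at hpt

-- discarding an already-visited or out-of-range head preserves the invariant
theorem pvDrop (n num steps : Int) (rest : List (Int × Int)) (U : List Bool) (s0 : Int)
    (hInv : pvInv n ((num, steps) :: rest) U s0)
    (hg : ¬ (num ≤ n ∧ pvLook U num = false)) : pvInv n rest U s0 := by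
  obtain ⟨hs0, hlen, hsplit, h2, h3a, h3b⟩ := hInv
  obtain ⟨Q1, Q2, heq, hl1, hl2⟩ := hsplit
  refine ⟨hs0, hlen, ?_, fun e he => h2 e (by simp [he]), h3a, ?_⟩
  · cases Q1 with
    | nil =>
      simp only [List.nil_append] at heq
      cases Q2 with
      | nil => simp at heq
      | cons b Q2' =>
        refine ⟨[], Q2', by simp [(by simpa using heq : (num, steps) = b ∧ rest = Q2').2], by simp, ?_⟩
        intro e he
        exact hl2 e (by simp [he])
    | cons a Q1' =>
      have h' : (num, steps) = a ∧ rest = Q1' ++ Q2 := by simpa using heq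
      refine ⟨Q1', Q2, h'.2, fun e he => hl1 e (by simp [he]), hl2⟩
  · intro m h1 hmn hf hle
    rcases h3b m h1 hmn hf hle with hmem | hcl
    · rcases List.mem_cons.mp hmem with hh | ht
      · -- the head cannot be an unvisited in-range node here
        have hm : m = num := by
          have := congrArg Prod.fst hh
          simpa using this
        exfalso
        apply hg
        rw [← hm]
        exact ⟨hmn, hf⟩
      · exact Or.inl ht
    · exact Or.inr hcl

-- processing an unvisited in-range head ≠ n preserves the invariant
theorem pvStep (n num : Int) (rest : List (Int × Int)) (U : List Bool) (s0 : Int)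
    (hInv : pvInv n ((num, s0) :: rest) U s0)
    (hle : num ≤ n) (hf : pvLook U num = false) :
    pvInv n (rest ++ [(num * 2, s0 + 1), (num + 1, s0 + 1)]) (PySem.List.pySetD U num true) s0 := by
  have hgnum : gI num = s0 := pvFrontg n num rest U s0 hInv hle hf
  obtain ⟨hs0, hlen, hsplit, h2, h3a, h3b⟩ := hInv
  have h1num : 1 ≤ num := (h2 (num, s0) (by simp)).1
  have hlen' : ((PySem.List.pySetD U num true).length : Int) = n + 1 := by
    rw [PySem.List.length_pySetD]; exact hlen
  have hlook : ∀ m : Int, 0 ≤ m → m < n + 1 →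
      pvLook (PySem.List.pySetD U num true) m = if m = num then true else pvLook U m := by
    intro m h0 hm
    exact pvLook_set U num m (by omega) (by omega) h0 (by omega)
  obtain ⟨Q1, Q2, heq, hl1, hl2⟩ := hsplit
  -- the head lies in the level-s0 prefix
  have hQ1 : ∃ Q1', Q1 = (num, s0) :: Q1' := by
    cases Q1 with
    | nil =>
      simp only [List.nil_append] at heq
      cases Q2 with
      | nil => simp at heq
      | cons b Q2' =>
        exfalso
        have hb : (num, s0) = b := (by simpa using heq : (num, s0) = b ∧ rest = Q2').1
        have := hl2 b (by simp)
        rw [← hb] at this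
        simp at this
    | cons a Q1' =>
      exact ⟨Q1', by rw [(by simpa using heq : (num, s0) = a ∧ rest = Q1' ++ Q2).1.symm]⟩
  obtain ⟨Q1', hQ1'⟩ := hQ1
  have hrest : rest = Q1' ++ Q2 := by
    rw [hQ1'] at heq
    simpa using heq
  refine ⟨hs0, hlen', ?_, ?_, ?_, ?_⟩
  · refine ⟨Q1', Q2 ++ [(num * 2, s0 + 1), (num + 1, s0 + 1)], by simp [hrest], ?_, ?_⟩
    · intro e he
      exact hl1 e (by simp [hQ1', he])
    · intro e he
      rcases List.mem_append.mp he with h | h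
      · exact hl2 e h
      · rcases List.mem_cons.mp h with h' | h'
        · rw [h']
        · simp only [List.mem_singleton] at h'
          rw [h']
  · intro e he
    rcases List.mem_append.mp he with h | h
    · exact h2 e (by simp [h])
    · rcases List.mem_cons.mp h with h' | h'
      · rw [h']
        refine ⟨by norm_num; omega, ?_⟩
        show gI (num * 2) ≤ s0 + 1
        rw [gI_two_mul num h1num]
        omega
      · simp only [List.mem_singleton] at h'
        rw [h']
        refine ⟨by norm_num; omega, ?_⟩
        show gI (num + 1) ≤ s0 + 1
        have := gI_succ_le num.toNat num (le_refl _) h1num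
        omega
  · intro m h1 hmn ht
    rw [hlook m (by omega) (by omega)] at ht
    by_cases hm : m = num
    · rw [hm, hgnum]
    · rw [if_neg hm] at ht
      exact h3a m h1 hmn ht
  · intro m h1 hmn hf' hle'
    rw [hlook m (by omega) (by omega)] at hf'
    by_cases hm : m = num
    · rw [if_pos hm] at hf'
      simp at hf'
    · rw [if_neg hm] at hf'
      rcases h3b m h1 hmn hf' hle' with hmem | ⟨hg, hpu⟩
      · rcases List.mem_cons.mp hmem with hh | ht
        · exfalso
          exact hm (by simpa using congrArg Prod.fst hh)
        · exact Or.inl (List.mem_append.mpr (Or.inl ht))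
      · have hm2 : 2 ≤ m := by
          by_contra hc
          have := gI_le_one m (by omega)
          omega
        obtain ⟨hp1, hplt, hpg⟩ := pvParent_spec m hm2
        by_cases hp : pvParent m = num
        · -- m is a child of num: its entry was just enqueued
          left
          have hmval : m = num * 2 ∨ m = num + 1 := by
            unfold pvParent at hp
            by_cases hme : m % 2 = 0
            · rw [if_pos hme] at hp
              left; omega
            · rw [if_neg hme] at hp
              right; omega
          apply List.mem_append.mpr
          right
          rcases hmval with hv | hv
          · rw [hv, ← hg]
            rw [← hv]
            simp
          · rw [hv, ← hg]
            rw [← hv]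
            simp
        · right
          refine ⟨hg, ?_⟩
          rw [hlook (pvParent m) (by omega) (by omega), if_neg hp]
          exact hpu

-- the main loop lemma: from any invariant state with n unvisited, the loop returns gI n
-- bridges between the array `used` and its list of entries
theorem pvALook_eq (U : Array Bool) (m : Int) (h0 : 0 ≤ m) (hm : m < (U.size : Int)) :
    pvALook U m = pvLook U.toList m := by
  unfold pvALook pvLook
  have hlt : m.toNat < U.toList.length := by
    rw [Array.length_toList]; omega
  rw [PySem.List.pyGetD_eq_getElem _ _ h0 (by rw [Array.length_toList]; exact_mod_cast hm)]
  rw [← Array.getElem?_toList, List.getElem?_eq_getElem hlt]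
  rfl

theorem pvASet_toList (U : Array Bool) (m : Int) (h0 : 0 ≤ m) :
    (pvASet U m true).toList = PySem.List.pySetD U.toList m true := by
  unfold pvASet
  rw [Array.toList_setIfInBounds, PySem.List.pySetD_of_nonneg _ _ h0]

-- the main loop lemma: from any invariant state with n unvisited, the loop returns gI n
theorem pvLoop (n : Int) (hn : 1 ≤ n) :
    ∀ (μ : Nat) (front back : List (Int × Int)) (U : Array Bool) (s0 : Int),
      5 * pvCountFalse U + front.length + 2 * back.length ≤ μ →
      pvInv n (front ++ back.reverse) U.toList s0 → pvLook U.toList n = false →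
      bfsLoop n front back U = some (gI n) := by
  intro μ
  induction μ with
  | zero =>
    intro front back U s0 hμ hInv hN
    cases front with
    | nil =>
      cases back with
      | nil => exact (pvNoEmpty n U.toList s0 hn (by simpa using hInv) hN).elim
      | cons b bs => simp only [List.length_cons, List.length_nil] at hμ; omega
    | cons e rest => simp only [List.length_cons] at hμ; omega
  | succ μ ih =>
    intro front back U s0 hμ hInv hN
    cases front with
    | nil =>
      cases back with
      | nil => exact (pvNoEmpty n U.toList s0 hn (by simpa using hInv) hN).elim
      | cons b bs =>
        rw [bfsLoop]
        apply ih _ _ _ s0 ?_ ?_ hN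
        · simp only [List.length_reverse, List.length_cons, List.length_nil] at *
          omega
        · simpa using hInv
    | cons e rest =>
      obtain ⟨num, steps⟩ := e
      obtain ⟨s0', hsteps, hInv'⟩ :=
        pvNorm n num steps (rest ++ back.reverse) U.toList s0 (by simpa using hInv)
      subst hsteps
      rw [bfsLoop]
      have hlen : ((U.toList.length : Int)) = n + 1 := hInv'.2.1
      have hsz : (U.size : Int) = n + 1 := by rw [← Array.length_toList]; exact hlen
      have h1num : 1 ≤ num := (hInv'.2.2.2.1 (num, steps) (by simp)).1
      by_cases hg : num ≤ n ∧ pvALook U num = false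
      · rw [dif_pos hg]
        have hf : pvLook U.toList num = false := by
          rw [← pvALook_eq U num (by omega) (by omega)]
          exact hg.2
        by_cases heqn : num = n
        · rw [if_pos heqn]
          have hfr := pvFrontg n num (rest ++ back.reverse) U.toList steps hInv' hg.1 hf
          rw [← heqn, hfr]
        · rw [if_neg heqn]
          apply ih _ _ _ steps ?_ ?_ ?_
          · have hc := pvCountASet U num hg.2
            unfold pvCountFalse at *
            simp only [List.length_cons] at *
            omega
          · have hstep := pvStep n num (rest ++ back.reverse) U.toList steps hInv' hg.1 hf
            have hsh : rest ++ ((num + 1, steps + 1) :: (num * 2, steps + 1) :: back).reverse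
                = (rest ++ back.reverse) ++ [(num * 2, steps + 1), (num + 1, steps + 1)] := by
              simp
            rw [hsh, pvASet_toList U num (by omega)]
            exact hstep
          · rw [pvASet_toList U num (by omega)]
            rw [pvLook_set U.toList num n (by omega) (by omega) (by omega) (by omega),
              if_neg (by omega)]
            exact hN
      · rw [dif_neg hg]
        apply ih _ _ _ steps ?_ ?_ hN
        · simp only [List.length_cons] at hμ
          omega
        · apply pvDrop n num steps (rest ++ back.reverse) U.toList steps hInv'
          intro hc
          apply hg
          refine ⟨hc.1, ?_⟩
          rw [pvALook_eq U num (by omega) (by omega)]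
          exact hc.2

-- initial state satisfies the invariant, hence A computes gI
theorem bfs_eq_gI (n : Int) (hn : 1 ≤ n) : bfs n = gI n := by
  unfold bfs
  have htl : (Array.replicate (n + 1).toNat false).toList = List.replicate (n + 1).toNat false :=
    Array.toList_replicate
  have hlen : (((List.replicate (n + 1).toNat false).length : Nat) : Int) = n + 1 := by
    simp; omega
  have hInv0 : pvInv n ([(1, 0)] ++ ([] : List (Int × Int)).reverse)
      (Array.replicate (n + 1).toNat false).toList 0 := by
    rw [htl]
    refine ⟨le_refl 0, hlen, ⟨[(1, 0)], [], by simp, by simp, by simp⟩, ?_, ?_, ?_⟩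
    · intro e he
      simp at he
      rw [he]
      refine ⟨by omega, ?_⟩
      rw [gI_le_one 1 (by omega)]
    · intro m h1 hmn ht
      rw [pvLook_replicate _ m (by omega) (by omega)] at ht
      simp at ht
    · intro m h1 hmn hf hle
      by_cases hm1 : m = 1
      · left
        rw [hm1, gI_le_one 1 (by omega)]
        simp
      · have hm2 : 2 ≤ m := by omega
        right
        obtain ⟨hp1, hplt, hpg⟩ := pvParent_spec m hm2
        have hgp : 0 ≤ gI (pvParent m) := gI_nonneg _
        have hg1 : 1 ≤ gI m := gI_pos m hm2
        refine ⟨by omega, ?_⟩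
        exact pvLook_replicate _ (pvParent m) (by omega) (by omega)
  have hN0 : pvLook (Array.replicate (n + 1).toNat false).toList n = false := by
    rw [htl]
    exact pvLook_replicate _ n (by omega) (by omega)
  rw [pvLoop n hn (5 * pvCountFalse (Array.replicate (n + 1).toNat false) + 1)
    [(1, 0)] [] _ 0 (by simp) hInv0 hN0]
  rfl

-- ===== VERDICT (by name: the statement is the Claim_ definition above) =====
theorem bfs_spec : Claim_equal_bfs := by
  unfold Claim_equal_bfs
  intro n _ hpre
  unfold Spec_bfs bfs_alt
  rw [bfs_eq_gI n hpre, bfsAltGo_eq n 0]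
  omega
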